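-- pv_equiv track=rewrite | github.com/dvalp/advent_of_code | y2023/src/day_01_solution.py | calibration_total_corrected
-- ===== SOURCE A (Python) =====
-- from enum import StrEnum
--
-- class Number(StrEnum):
--     ONE = "1"
--     TWO = "2"
--     THREE = "3"
--     FOUR = "4"
--     FIVE = "5"
--     SIX = "6"
--     SEVEN = "7"
--     EIGHT = "8"
--     NINE = "9"
--     ZERO = "0"
--
-- def calibration_total_corrected(calibrations: list[str]) -> int:
--     total = 0
--     for line in calibrations:
--         digits = []
--         for i in range(len(line)):
--             for key, value in Number.__members__.items():
--                 if line[i:].startswith(key.lower()):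
--                     digits.append(str(value))
--                 elif (char := line[i]).isdigit():
--                     digits.append(char)
--                     break
--         total += int("".join([digits[0], digits[-1]]))
--     return total
-- ===== SOURCE B (Python) =====
-- _WORDS = (("one", "1"), ("two", "2"), ("three", "3"), ("four", "4"),
--           ("five", "5"), ("six", "6"), ("seven", "7"), ("eight", "8"),
--           ("nine", "9"), ("zero", "0"))
--
--
-- def _token_at(line, i):
--     """Token value at position i, or None: a digit char, or a spelled-out number word."""
--     c = line[i]
--     if c.isdigit():
--         return c
--     for w, d in _WORDS:
--         if line.startswith(w, i):
--             return d
--     return None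
--
--
-- def _first_token(line):
--     for i in range(len(line)):
--         t = _token_at(line, i)
--         if t is not None:
--             return t
--     raise ValueError("no digit token in line")
--
--
-- def _last_token(line):
--     for i in range(len(line) - 1, -1, -1):
--         t = _token_at(line, i)
--         if t is not None:
--             return t
--     raise ValueError("no digit token in line")
--
--
-- def calibration_total_corrected(calibrations: list[str]) -> int:
--     return sum(int(_first_token(line) + _last_token(line)) for line in calibrations)
-- ===== Notes on version B (the rewrite author's own statement) =====
-- stated objective: alternative
-- what changed: A builds the full list of every token in the line (a triple loop over positions and the ten number words, always scanning the whole line) and then takes its first and last element; B never materialises that list: it does one forward early-exit scan for the first token and one backward early-exit scan for the last.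
-- outside the precondition, e.g. on calibration_total_corrected(['abc']): A raises IndexError, B raises ValueError
import Mathlib
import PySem

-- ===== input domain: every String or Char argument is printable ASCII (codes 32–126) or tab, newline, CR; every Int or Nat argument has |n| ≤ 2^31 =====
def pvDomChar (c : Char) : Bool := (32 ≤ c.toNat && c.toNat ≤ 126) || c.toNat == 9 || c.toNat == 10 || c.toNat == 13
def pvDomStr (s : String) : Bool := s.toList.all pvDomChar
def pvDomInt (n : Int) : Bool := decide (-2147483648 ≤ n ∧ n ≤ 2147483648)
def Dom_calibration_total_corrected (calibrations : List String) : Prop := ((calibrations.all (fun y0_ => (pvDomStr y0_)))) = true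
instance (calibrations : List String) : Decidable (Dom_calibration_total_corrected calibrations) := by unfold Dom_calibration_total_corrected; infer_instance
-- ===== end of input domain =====

-- B replaces A's full scan that collects every token of the line into a list with two
-- early-exit scans (forward for the first token, backward for the last); equivalence is
-- proved on lines that contain at least one token (elsewhere both Pythons raise).

-- ===== PORT A =====

-- Number.__members__ in declaration order: (key.lower(), str(value))
def pvWords : List (List Char × Char) :=
  [(['o','n','e'], '1'), (['t','w','o'], '2'), (['t','h','r','e','e'], '3'),
   (['f','o','u','r'], '4'), (['f','i','v','e'], '5'), (['s','i','x'], '6'),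
   (['s','e','v','e','n'], '7'), (['e','i','g','h','t'], '8'),
   (['n','i','n','e'], '9'), (['z','e','r','o'], '0')]

-- the inner 'for key, value in Number.__members__.items():' loop; s = line[i:] (nonempty
-- at every call site, so line[i] = s.headD ' ' exactly)
def pvMemLoop (s : List Char) : List (List Char × Char) → List Char → List Char
  | [], digits => digits
  | (k, v) :: rest, digits =>
    if PySem.Chars.startswith s k then pvMemLoop s rest (digits ++ [v])
    else if PySem.Chars.isdigit (s.headD ' ') then digits ++ [s.headD ' ']
    else pvMemLoop s rest digits

-- the 'for i in range(len(line)):' loop building digits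
def pvDigitsA (line : List Char) : List Char :=
  (PySem.List.pyRange 0 line.length 1).foldl
    (fun digits i => pvMemLoop (line.drop i.toNat) pvWords digits) []

def calibration_total_corrected (calibrations : List String) : Int :=
  calibrations.foldl
    (fun total line =>
      let digits := pvDigitsA line.toList
      -- digits[0] / digits[-1]: IndexError (none) is excluded by Pre_
      let d0 := (PySem.List.pyGet? digits 0).getD ' '
      let dl := (PySem.List.pyGet? digits (-1)).getD ' '
      total + (PySem.Int.ofChars? [d0, dl]).getD 0) 0

-- ===== PORT B =====

-- _token_at(line, i) on the suffix s = line[i:] (nonempty at every call site)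
def pvTokenAt : List Char → Option Char
  | [] => none
  | c :: t =>
    if PySem.Chars.isdigit c then some c
    else (pvWords.find? (fun p => PySem.Chars.startswith (c :: t) p.1)).map (·.2)

-- _first_token: forward index loop, i ↔ the suffix line[i:]
def pvFirstTok : List Char → Option Char
  | [] => none
  | c :: t =>
    match pvTokenAt (c :: t) with
    | some d => some d
    | none => pvFirstTok t

-- _last_token: the reversed index loop range(len-1, -1, -1); preferring the result on the
-- tail realises "later positions are tried first"
def pvLastTok : List Char → Option Char
  | [] => none
  | c :: t =>
    match pvLastTok t with
    | some d => some d
    | none => pvTokenAt (c :: t)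

def calibration_total_corrected_alt (calibrations : List String) : Int :=
  calibrations.foldl
    (fun total line =>
      match pvFirstTok line.toList, pvLastTok line.toList with
      | some f, some l => total + (PySem.Int.ofChars? [f, l]).getD 0
      | _, _ => total)  -- both helpers raise ValueError in Python: excluded by Pre_
    0

-- ===== PRECONDITION & SPEC =====

-- Pre_ excludes lines with no token (no digit character and no spelled-out number word):
-- there A raises IndexError on digits[0] and B raises ValueError.
def Pre_calibration_total_corrected (calibrations : List String) : Prop :=
  ∀ s ∈ calibrations, ∃ i < s.toList.length,
    PySem.Chars.isdigit (s.toList.getD i ' ') = true ∨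
    ∃ p ∈ pvWords, p.1 <+: s.toList.drop i

instance (calibrations : List String) : Decidable (Pre_calibration_total_corrected calibrations) := by
  unfold Pre_calibration_total_corrected; infer_instance

def pvWitness_calibration_total_corrected : List String := ["one2", "x7b"]

def Spec_calibration_total_corrected (calibrations : List String) (out : Int) : Prop := out = calibration_total_corrected_alt calibrations
instance (calibrations : List String) (out : Int) : Decidable (Spec_calibration_total_corrected calibrations out) := by unfold Spec_calibration_total_corrected; infer_instance

-- ===== CLAIM (what is proved, stated in full; the proofs are below) =====
def Claim_equal_calibration_total_corrected : Prop := ∀ (calibrations : List String), Dom_calibration_total_corrected calibrations → Pre_calibration_total_corrected calibrations → Spec_calibration_total_corrected calibrations (calibration_total_corrected calibrations)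

-- ===== LEMMAS AND PROOFS =====

-- the tokens of line, one Option per position, flattened (proof-side view of A's digits list)
def pvG (s : List Char) : List Char :=
  (List.range s.length).flatMap (fun i => (pvTokenAt (s.drop i)).toList)

-- facts about the literal word table
lemma pvWords_nodup : pvWords.Nodup := by decide

lemma pvWords_len2 : ∀ p ∈ pvWords, 2 ≤ p.1.length := by decide

lemma pvWords_take2 : ∀ p ∈ pvWords, ∀ q ∈ pvWords, p ≠ q → p.1.take 2 ≠ q.1.take 2 := by decide

lemma pvWords_head_not_digit :
    ∀ p ∈ pvWords, ∀ c t, p.1 <+: (c :: t) → PySem.Chars.isdigit c = false := by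
  intro p hp c t hpre
  fin_cases hp <;>
    (obtain ⟨u, hu⟩ := hpre; cases hu; rfl)

-- at most one word of the table is a prefix of s
lemma pvWords_prefix_unique {s : List Char} :
    ∀ p ∈ pvWords, ∀ q ∈ pvWords, p.1 <+: s → q.1 <+: s → p = q := by
  intro p hp q hq hps hqs
  by_contra hne
  have h2p : 2 ≤ p.1.length := pvWords_len2 p hp
  have h2q : 2 ≤ q.1.length := pvWords_len2 q hq
  have hps2 : p.1.take 2 <+: s := (List.take_prefix 2 p.1).trans hps
  have hqs2 : q.1.take 2 <+: s := (List.take_prefix 2 q.1).trans hqs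
  have hlen : (p.1.take 2).length = (q.1.take 2).length := by
    simp [List.length_take]; omega
  have : p.1.take 2 = q.1.take 2 := by
    rcases List.prefix_or_prefix_of_prefix hps2 hqs2 with h | h
    · exact h.eq_of_length hlen
    · exact (h.eq_of_length hlen.symm).symm
  exact pvWords_take2 p hp q hq hne this

-- accumulator of the inner loop just appends
lemma pvMemLoop_append (s : List Char) :
    ∀ ws digits, pvMemLoop s ws digits = digits ++ pvMemLoop s ws [] := by
  intro ws
  induction ws with
  | nil => intro digits; simp [pvMemLoop]
  | cons kv rest ih =>
    intro digits
    obtain ⟨k, v⟩ := kv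
    simp only [pvMemLoop, List.nil_append]
    split
    · rw [ih (digits ++ [v]), ih [v]]
      simp
    · split
      · simp
      · exact ih digits

-- the inner loop when the position's character is not a digit: first matching word, if any
lemma pvMemLoop_no_digit {s : List Char} (hd : PySem.Chars.isdigit (s.headD ' ') = false) :
    ∀ ws, ws.Sublist pvWords →
      pvMemLoop s ws [] = ((ws.find? (fun p => PySem.Chars.startswith s p.1)).map (·.2)).toList := by
  intro ws
  induction ws with
  | nil => intro _; simp [pvMemLoop]
  | cons kv rest ih =>
    intro hsub
    obtain ⟨k, v⟩ := kv
    have hrest : rest.Sublist pvWords := (List.sublist_cons_self (k, v) rest).trans hsub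
    by_cases h1 : PySem.Chars.startswith s k
    · -- (k,v) matches; no other word can also match, so the tail contributes nothing
      have hmem : ((k, v) : List Char × Char) ∈ pvWords := hsub.subset List.mem_cons_self
      have hpre : k <+: s := (PySem.Chars.startswith_iff s k).mp h1
      have hnd : ¬ ((k, v) : List Char × Char) ∈ rest :=
        (List.nodup_cons.mp (hsub.nodup pvWords_nodup)).1
      have htail : rest.find? (fun p => PySem.Chars.startswith s p.1) = none := by
        rw [List.find?_eq_none]
        intro q hq hqs
        have hqpre : q.1 <+: s := (PySem.Chars.startswith_iff s q.1).mp hqs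
        have : ((k, v) : List Char × Char) = q :=
          pvWords_prefix_unique (k, v) hmem q (hrest.subset hq) hpre hqpre
        exact hnd (this ▸ hq)
      have htail' : pvMemLoop s rest [] = [] := by
        rw [ih hrest, htail]; rfl
      simp only [pvMemLoop, h1, if_pos, List.nil_append]
      rw [pvMemLoop_append s rest [v], htail']
      simp [h1]
    · simp only [pvMemLoop, h1, Bool.false_eq_true, if_false]
      rw [if_neg (by simpa using hd)]
      have hih := ih hrest
      simp [h1, hih]

-- A's inner loop computes exactly B's _token_at
lemma pvMemLoop_eq_tokenAt (s : List Char) :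
    pvMemLoop s pvWords [] = (pvTokenAt s).toList := by
  match s with
  | [] => decide
  | c :: t =>
    by_cases hd : PySem.Chars.isdigit c
    · -- a digit position: no word starts with a digit, so the first branch falls through
      have hone : ¬ PySem.Chars.startswith (c :: t) ['o','n','e'] = true := by
        intro h
        have := pvWords_head_not_digit (['o','n','e'], '1') (by decide) c t
          ((PySem.Chars.startswith_iff _ _).mp h)
        simp [this] at hd
      have hstep : pvMemLoop (c :: t) pvWords [] = [c] := by
        show pvMemLoop (c :: t) ((['o','n','e'], '1') :: pvWords.tail) [] = [c]
        simp only [pvMemLoop]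
        rw [if_neg hone, if_pos (by simpa using hd)]
        rfl
      simp [hstep, pvTokenAt, hd]
    · have hd' : PySem.Chars.isdigit ((c :: t).headD ' ') = false := by
        simpa using eq_false_of_ne_true hd
      rw [pvMemLoop_no_digit hd' pvWords (List.Sublist.refl pvWords)]
      simp [pvTokenAt, hd]

lemma pvG_cons (c : Char) (t : List Char) :
    pvG (c :: t) = (pvTokenAt (c :: t)).toList ++ pvG t := by
  simp [pvG, List.range_succ_eq_map, List.flatMap_cons, List.flatMap_map]

-- A's digits list, characterised
lemma pvDigitsA_eq (line : List Char) : pvDigitsA line = pvG line := by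
  have key : ∀ (js : List Nat) (init : List Char),
      (js.map (fun k : Nat => (k : Int))).foldl
          (fun digits i => pvMemLoop (line.drop i.toNat) pvWords digits) init
      = init ++ js.flatMap (fun i => (pvTokenAt (line.drop i)).toList) := by
    intro js
    induction js with
    | nil => intro init; simp
    | cons j js ih =>
      intro init
      simp only [List.map_cons, List.foldl_cons, List.flatMap_cons, Int.toNat_natCast]
      rw [pvMemLoop_append, pvMemLoop_eq_tokenAt, ih]
      simp
  unfold pvDigitsA
  rw [PySem.List.pyRange_one]
  simp only [Int.sub_zero, Int.toNat_natCast, zero_add]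
  rw [key]
  simp [pvG]

lemma pvFirstTok_eq (s : List Char) : pvFirstTok s = (pvG s).head? := by
  induction s with
  | nil => rfl
  | cons c t ih =>
    rw [pvG_cons]
    cases htok : pvTokenAt (c :: t) with
    | none => simpa [pvFirstTok, htok] using ih
    | some d => simp [pvFirstTok, htok]

lemma pvLastTok_eq (s : List Char) : pvLastTok s = (pvG s).getLast? := by
  induction s with
  | nil => rfl
  | cons c t ih =>
    rw [pvG_cons]
    cases hlt : pvLastTok t with
    | some d =>
      have hne : pvG t ≠ [] := by
        intro h; rw [h] at ih; simp [hlt] at ih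
      rw [List.getLast?_append_of_ne_nil _ hne, ← ih]
      simp [pvLastTok, hlt]
    | none =>
      have hnil : pvG t = [] := by
        rw [hlt] at ih
        exact List.getLast?_eq_none_iff.mp ih.symm
      rw [hnil]
      cases htok : pvTokenAt (c :: t) <;> simp [pvLastTok, hlt, htok]

-- the two per-line bodies agree (on every line: where no token exists both add 0)
lemma pvLine_eq (line : String) (total : Int) :
    (let digits := pvDigitsA line.toList
     let d0 := (PySem.List.pyGet? digits 0).getD ' '
     let dl := (PySem.List.pyGet? digits (-1)).getD ' '
     total + (PySem.Int.ofChars? [d0, dl]).getD 0)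
    = match pvFirstTok line.toList, pvLastTok line.toList with
      | some f, some l => total + (PySem.Int.ofChars? [f, l]).getD 0
      | _, _ => total := by
  simp only [pvDigitsA_eq, pvFirstTok_eq, pvLastTok_eq, PySem.List.pyGet?_neg_one]
  cases hg : pvG line.toList with
  | nil => simp [PySem.List.pyGet?]; decide
  | cons a rest =>
    have hhead : (a :: rest).head? = some a := rfl
    have hlast : ∃ l, (a :: rest).getLast? = some l :=
      ⟨_, List.getLast?_eq_some_getLast (l := a :: rest) (by simp)⟩
    obtain ⟨l, hl⟩ := hlast
    simp [PySem.List.pyGet?, PySem.List.pyIdx?, hl]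

lemma pvFoldl_eq : ∀ (xs : List String) (total : Int),
    xs.foldl
      (fun total line =>
        let digits := pvDigitsA line.toList
        let d0 := (PySem.List.pyGet? digits 0).getD ' '
        let dl := (PySem.List.pyGet? digits (-1)).getD ' '
        total + (PySem.Int.ofChars? [d0, dl]).getD 0) total
    = xs.foldl
        (fun total line =>
          match pvFirstTok line.toList, pvLastTok line.toList with
          | some f, some l => total + (PySem.Int.ofChars? [f, l]).getD 0
          | _, _ => total) total := by
  intro xs
  induction xs with
  | nil => intro total; rfl
  | cons x xs ih =>
    intro total
    simp only [List.foldl_cons]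
    rw [← pvLine_eq x total]
    exact ih _

-- ===== VERDICT (by name: the statement is the Claim_ definition above) =====
theorem calibration_total_corrected_spec : Claim_equal_calibration_total_corrected := by
  intro calibrations _ _
  unfold Spec_calibration_total_corrected
  unfold calibration_total_corrected calibration_total_corrected_alt
  exact pvFoldl_eq calibrations 0
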